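-- pv_equiv track=rewrite | github.com/jourdanwilson/Apprentissage_supervise | scripts/stats&traitement.py | freq_labels_ok
-- ===== SOURCE A (Python) =====
-- def freq_labels_ok(label_counts):
--     if not label_counts:
--         return True
--     majority_count = max(label_counts.values())
--     for label, count in label_counts.items():
--         if count < majority_count / 2:
--             return False
--     return True
-- ===== SOURCE B (Python) =====
-- def freq_labels_ok(label_counts):
--     vals = sorted(label_counts.values())
--     if not vals:
--         return True
--     return vals[0] >= vals[-1] / 2
-- ===== Notes on version B (the rewrite author's own statement) =====
-- stated objective: alternative
-- what changed: Replaces the early-exit loop over every (label, count) pair against a precomputed max by sorting the values once and comparing the smallest (vals[0]) against half the largest (vals[-1]/2), since 'all counts >= max/2' holds iff the minimum does.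
import Mathlib
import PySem

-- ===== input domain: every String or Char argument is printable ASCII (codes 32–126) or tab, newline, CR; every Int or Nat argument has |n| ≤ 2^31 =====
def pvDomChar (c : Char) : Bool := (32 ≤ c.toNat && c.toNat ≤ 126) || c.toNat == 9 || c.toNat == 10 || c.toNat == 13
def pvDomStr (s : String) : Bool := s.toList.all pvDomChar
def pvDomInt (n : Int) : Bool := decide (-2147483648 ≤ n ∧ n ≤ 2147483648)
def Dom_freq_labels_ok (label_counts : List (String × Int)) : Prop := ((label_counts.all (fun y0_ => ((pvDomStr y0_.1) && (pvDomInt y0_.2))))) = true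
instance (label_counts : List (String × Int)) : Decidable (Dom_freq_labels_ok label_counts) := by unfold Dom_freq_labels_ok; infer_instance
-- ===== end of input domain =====

-- B replaces A's early-exit loop over every (label, count) pair (against a precomputed max)
-- by sorting the values once and comparing the smallest against half the largest.

-- ===== PORT A =====
-- Python's `count < majority_count / 2` uses true (float) division; on integer counts with
-- |count| ≤ 2^31 it is exactly `2 * count < majority_count` (floats are exact below 2^53).
def freqLoopA (m : Int) : List (String × Int) → Bool
  | [] => true
  | (_, c) :: rest => if 2 * c < m then false else freqLoopA m rest

def freq_labels_ok (label_counts : List (String × Int)) : Bool :=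
  if label_counts.isEmpty then true
  else
    match PySem.List.max? (label_counts.map Prod.snd) (fun v => v) with
    | none => true
    | some m => freqLoopA m label_counts

-- ===== PORT B =====
-- Source B: vals = sorted(label_counts.values()); empty guard; vals[0] >= vals[-1] / 2
-- (the /2 comparison is again exact as `2 * lo ≥ hi` on the stated integer domain).
def freq_labels_ok_alt (label_counts : List (String × Int)) : Bool :=
  let vals := PySem.List.sorted (label_counts.map Prod.snd) (fun v => v) false
  if vals.isEmpty then true
  else
    match vals.head?, PySem.List.pyGet? vals (-1) with
    | some lo, some hi => decide (2 * lo ≥ hi)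
    | _, _ => true

-- ===== PRECONDITION & SPEC =====
def Spec_freq_labels_ok (label_counts : List (String × Int)) (out : Bool) : Prop := out = freq_labels_ok_alt label_counts
instance (label_counts : List (String × Int)) (out : Bool) : Decidable (Spec_freq_labels_ok label_counts out) := by unfold Spec_freq_labels_ok; infer_instance

-- ===== CLAIM (what is proved, stated in full; the proofs are below) =====
def Claim_equal_freq_labels_ok : Prop := ∀ (label_counts : List (String × Int)), Dom_freq_labels_ok label_counts → Spec_freq_labels_ok label_counts (freq_labels_ok label_counts)

-- ===== LEMMAS AND PROOFS =====

theorem freqLoopA_eq_all (m : Int) (lc : List (String × Int)) :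
    freqLoopA m lc = lc.all (fun p => !(decide (2 * p.2 < m))) := by
  induction lc with
  | nil => rfl
  | cons h t ih =>
    obtain ⟨l, c⟩ := h
    by_cases hc : 2 * c < m <;> simp [freqLoopA, hc, ih]

-- ===== VERDICT (by name: the statement is the Claim_ definition above) =====
theorem freq_labels_ok_spec : Claim_equal_freq_labels_ok := by
  intro lc _
  unfold Spec_freq_labels_ok freq_labels_ok freq_labels_ok_alt
  by_cases he : lc.isEmpty
  · have : lc = [] := List.isEmpty_iff.mp he
    subst this
    rfl
  · simp only [he]
    have hlcne : lc ≠ [] := by simpa [List.isEmpty_iff] using he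
    set vs := PySem.List.sorted (lc.map Prod.snd) (fun v => v) false with hvs
    have hvsne : vs ≠ [] := by
      rw [hvs, Ne, PySem.List.sorted_eq_nil_iff]
      simp [hlcne]
    have hvse : vs.isEmpty = false := by simp [hvsne]
    simp only [hvse, Bool.false_eq_true, if_false]
    obtain ⟨lo, t, hcons⟩ := List.exists_cons_of_ne_nil hvsne
    have hhead : vs.head? = some lo := by rw [hcons]; rfl
    have hlast : PySem.List.pyGet? vs (-1) = some (vs.getLast hvsne) := by
      rw [PySem.List.pyGet?_neg_one, List.getLast?_eq_some_getLast]
    set hi := vs.getLast hvsne with hhi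
    -- lo is ≤ every value, hi is ≥ every value, and both are values
    have hperm : vs.Perm (lc.map Prod.snd) := PySem.List.sorted_perm _ _ _
    have hlo_le : ∀ y ∈ lc.map Prod.snd, lo ≤ y :=
      PySem.List.key_head_sorted_le _ _ (hvs.symm.trans hcons)
    have hlo_mem : lo ∈ lc.map Prod.snd := hperm.mem_iff.mp (by rw [hcons]; exact List.mem_cons_self)
    have hhi_mem : hi ∈ lc.map Prod.snd := hperm.mem_iff.mp (List.getLast_mem hvsne)
    have hpw : vs.Pairwise (fun a b => a ≤ b) :=
      PySem.List.sorted_pairwise (key := fun v => v) (xs := lc.map Prod.snd)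
    have hhi_ge : ∀ y ∈ lc.map Prod.snd, y ≤ hi := by
      intro y hy
      have hyvs : y ∈ vs := hperm.mem_iff.mpr hy
      obtain ⟨i, hilt, hyi⟩ := List.mem_iff_getElem.mp hyvs
      rw [hhi, List.getLast_eq_getElem]
      by_cases hlt : i < vs.length - 1
      · exact hyi ▸ List.pairwise_iff_getElem.mp hpw i (vs.length - 1) hilt (by omega) hlt
      · have heq : i = vs.length - 1 := by omega
        subst heq
        exact le_of_eq hyi.symm
    -- A's max is hi
    have hmax : PySem.List.max? (lc.map Prod.snd) (fun v => v) = some hi := by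
      rcases hmx : PySem.List.max? (lc.map Prod.snd) (fun v => v) with _ | m
      · exact absurd ((PySem.List.max?_eq_none_iff _ _).mp hmx) (by simp [hlcne])
      · have hm_mem : m ∈ lc.map Prod.snd := PySem.List.max?_mem hmx
        have hm_max : ∀ y ∈ lc.map Prod.snd, y ≤ m := PySem.List.max?_isMax hmx
        have : m = hi := le_antisymm (hhi_ge m hm_mem) (hm_max hi hhi_mem)
        rw [this]
    rw [hmax, hhead, hlast]
    show freqLoopA hi lc = decide (2 * lo ≥ hi)
    rw [freqLoopA_eq_all]
    by_cases hok : 2 * lo ≥ hi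
    · simp only [hok, decide_true, List.all_eq_true]
      intro p hp
      have := hlo_le p.2 (List.mem_map.mpr ⟨p, hp, rfl⟩)
      simp; omega
    · obtain ⟨p, hp, hpe⟩ := List.mem_map.mp hlo_mem
      simp only [hok, decide_false]
      rw [List.all_eq_false]
      exact ⟨p, hp, by simp; omega⟩
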